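-- pv_equiv track=rewrite | github.com/mouredev/roadmap-retos-programacion | Roadmap/50 - PLANIFICADOR DE OBJETIVOS DE AÑO NUEVO/python/santyjl.py | objetivos_calculados
-- ===== SOURCE A (Python) =====
-- def objetivos_calculados(objetivo: dict) -> list:
--     cantidad_total = objetivo['cantidad']
--     plazo = objetivo['plazo']
--
--     cantidad_mensual = cantidad_total // plazo
--     resto = cantidad_total % plazo
--
--     cantidades = [cantidad_mensual] * plazo
--
--     for i in range(resto):
--         cantidades[i] += 1
--
--     return cantidades
-- ===== SOURCE B (Python) =====
-- def objetivos_calculados(objetivo: dict) -> list: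
--     cantidad = objetivo['cantidad']
--     plazo = objetivo['plazo']
--     res = []
--     while plazo > 0:
--         m = cantidad // plazo
--         res.append(m)
--         cantidad -= m
--         plazo -= 1
--     res.reverse()
--     return res
-- ===== Notes on version B (the rewrite author's own statement) =====
-- stated objective: alternative
-- what changed: Replaces A's divmod-style split (uniform fill with cantidad//plazo, then patch the first cantidad%plazo entries) by greedy sequential allocation: repeatedly give the last remaining month floor(cantidad/plazo) of what is left, subtract it and decrement the month count, then reverse the accumulated list; no modulo and no remainder patching.
import Mathlib
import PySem

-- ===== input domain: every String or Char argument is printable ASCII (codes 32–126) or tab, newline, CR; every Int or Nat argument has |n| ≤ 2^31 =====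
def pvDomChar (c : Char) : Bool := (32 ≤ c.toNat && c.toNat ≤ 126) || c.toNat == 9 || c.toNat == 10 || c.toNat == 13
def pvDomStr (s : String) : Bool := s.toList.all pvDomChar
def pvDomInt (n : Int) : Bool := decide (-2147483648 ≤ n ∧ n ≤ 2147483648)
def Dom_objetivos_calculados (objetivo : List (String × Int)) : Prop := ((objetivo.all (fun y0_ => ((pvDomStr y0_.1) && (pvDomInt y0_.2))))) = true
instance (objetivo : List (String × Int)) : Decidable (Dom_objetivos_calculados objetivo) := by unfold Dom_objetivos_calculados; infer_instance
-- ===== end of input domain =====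

-- B replaces A's "uniform fill then patch the first `resto` entries" by greedy sequential
-- allocation (give the last remaining month floor(cantidad/plazo) of what is left, repeat,
-- reverse); objective: alternative. Equivalence is about the RETURN value.

-- ===== PORT A =====
def objetivos_calculados (objetivo : List (String × Int)) : List Int :=
  let d := PySem.Dict.ofList objetivo
  let cantidad_total := d.getD "cantidad" 0       -- lookup; Pre_ guarantees the key exists
  let plazo := d.getD "plazo" 0
  let cantidad_mensual := PySem.Int.floordiv cantidad_total plazo
  let resto := PySem.Int.mod cantidad_total plazo
  let cantidades := List.replicate plazo.toNat cantidad_mensual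
  (PySem.List.pyRange 0 resto 1).foldl
    (fun ys i => PySem.List.pySetD ys i (PySem.List.pyGetD ys i 0 + 1)) cantidades

-- ===== PORT B =====
-- the `while plazo > 0` loop of Source B, with its (cantidad, plazo, res) state
def bLoop (cantidad plazo : Int) (res : List Int) : List Int :=
  if _h : 0 < plazo then
    let m := PySem.Int.floordiv cantidad plazo
    bLoop (cantidad - m) (plazo - 1) (res ++ [m])
  else res
termination_by plazo.toNat
decreasing_by omega

def objetivos_calculados_alt (objetivo : List (String × Int)) : List Int :=
  let d := PySem.Dict.ofList objetivo
  let cantidad := d.getD "cantidad" 0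
  let plazo := d.getD "plazo" 0
  (bLoop cantidad plazo []).reverse

-- ===== PRECONDITION & SPEC =====
-- Pre_ excludes exactly the inputs where Python A raises: a missing 'cantidad' or 'plazo'
-- key (KeyError) or plazo == 0 (ZeroDivisionError).
def Pre_objetivos_calculados (objetivo : List (String × Int)) : Prop :=
  (PySem.Dict.ofList objetivo).contains "cantidad" = true ∧
  (PySem.Dict.ofList objetivo).contains "plazo" = true ∧
  (PySem.Dict.ofList objetivo).getD "plazo" 0 ≠ 0
instance (objetivo : List (String × Int)) : Decidable (Pre_objetivos_calculados objetivo) := by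
  unfold Pre_objetivos_calculados; infer_instance

def pvWitness_objetivos_calculados : (List (String × Int)) := [("cantidad", 10), ("plazo", 3)]

def Spec_objetivos_calculados (objetivo : List (String × Int)) (out : List Int) : Prop :=
  out = objetivos_calculados_alt objetivo
instance (objetivo : List (String × Int)) (out : List Int) : Decidable (Spec_objetivos_calculados objetivo out) := by
  unfold Spec_objetivos_calculados; infer_instance

-- ===== CLAIM (what is proved, stated in full; the proofs are below) =====
def Claim_equal_objetivos_calculados : Prop := ∀ (objetivo : List (String × Int)), Dom_objetivos_calculados objetivo → Pre_objetivos_calculados objetivo → Spec_objetivos_calculados objetivo (objetivos_calculados objetivo)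

-- ===== LEMMAS AND PROOFS =====

-- A's patch loop on the uniform list equals the balanced per-element formula, for j ≤ n.
lemma fill_loop (m : Int) (n : Nat) : ∀ (j : Nat), j ≤ n →
    (PySem.List.pyRange 0 (j : Int) 1).foldl
      (fun ys i => PySem.List.pySetD ys i (PySem.List.pyGetD ys i 0 + 1)) (List.replicate n m)
    = (List.range n).map (fun (k : Nat) => m + if (k : Int) < (j : Int) then 1 else 0) := by
  intro j hj
  induction j with
  | zero =>
      rw [PySem.List.pyRange_one_eq_nil (by omega)]
      apply List.ext_getElem
      · simp
      · intro k hk1 hk2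
        simp
  | succ j ih =>
      have h1 : ((j + 1 : Nat) : Int) = (j : Int) + 1 := by push_cast; ring
      rw [h1, PySem.List.pyRange_one_succ_right (by positivity), List.foldl_append,
        ih (by omega), List.foldl_cons, List.foldl_nil,
        PySem.List.pySetD_natCast, PySem.List.pyGetD_natCast]
      have hjn : j < n := by omega
      have hget : ((List.range n).map
          (fun (k : Nat) => m + if (k : Int) < (j : Int) then 1 else 0)).getD j 0 = m := by
        rw [List.getD_eq_getElem _ _ (by simpa using hjn)]
        simp
      rw [hget]
      apply List.ext_getElem
      · simp
      · intro k hk1 hk2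
        simp only [List.length_map, List.length_range] at hk2
        rw [List.getElem_set]
        by_cases hkj : j = k
        · subst hkj
          simp [List.getElem_map, List.getElem_range]
        · simp only [if_neg hkj, List.getElem_map, List.getElem_range]
          split_ifs <;> [rfl; omega; omega; rfl]

-- B's greedy loop produces the reversed balanced list.
lemma bLoop_eq (n : Nat) : ∀ (c : Int) (res : List Int), 0 < n →
    bLoop c (n : Int) res
    = res ++ ((List.range n).map
        (fun (k : Nat) => PySem.Int.floordiv c n +
          if (k : Int) < PySem.Int.mod c (n : Int) then 1 else 0)).reverse := by
  induction n with
  | zero => intro c res h; omega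
  | succ n ih =>
      intro c res _
      set q := PySem.Int.floordiv c ((n : Int) + 1) with hq
      set r := PySem.Int.mod c ((n : Int) + 1) with hr
      have hiden : q * ((n : Int) + 1) + r = c := PySem.Int.floordiv_mul_add_mod c _
      have hr0 : 0 ≤ r := PySem.Int.mod_nonneg c (by positivity)
      have hrlt : r < (n : Int) + 1 := PySem.Int.mod_lt c (by positivity)
      rw [bLoop]
      have hcast : ((n + 1 : Nat) : Int) = (n : Int) + 1 := by push_cast; ring
      simp only [hcast, dif_pos (show (0:Int) < (n : Int) + 1 by positivity)]
      rw [← hq]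
      cases Nat.eq_zero_or_pos n with
      | inl hn0 =>
          subst hn0
          rw [bLoop]
          simp only []
          simp [List.range_succ]
      | inr hnpos =>
          -- new quotient/remainder after handing out q
          have hn1 : (0:Int) < (n : Int) := by exact_mod_cast hnpos
          have hq' : PySem.Int.floordiv (c - q) (n : Int)
              = if r = (n : Int) then q + 1 else q := by
            split_ifs with hrn
            · rw [PySem.Int.floordiv_eq_iff_of_pos hn1]; constructor <;> nlinarith
            · rw [PySem.Int.floordiv_eq_iff_of_pos hn1]
              have : r < (n : Int) := by omega
              constructor <;> nlinarith
          have hr' : PySem.Int.mod (c - q) (n : Int)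
              = if r = (n : Int) then 0 else r := by
            have := PySem.Int.floordiv_mul_add_mod (c - q) (n : Int)
            rw [hq'] at this
            split_ifs at * <;> nlinarith
          rw [show (n : Int) + 1 - 1 = (n : Int) by ring, ih (c - q) _ hnpos, hq', hr']
          have hmap : (List.range n).map
              (fun (k : Nat) => (if r = (n : Int) then q + 1 else q) +
                if (k : Int) < (if r = (n : Int) then 0 else r) then 1 else 0)
              = (List.range n).map (fun (k : Nat) => q + if (k : Int) < r then 1 else 0) := by
            apply List.map_congr_left
            intro k hk
            have hkn : k < n := List.mem_range.mp hk
            split_ifs <;> omega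
          rw [hmap, List.range_succ, List.map_append, List.reverse_append]
          simp only [List.map_cons, List.map_nil, List.reverse_cons, List.reverse_nil,
            List.nil_append, List.singleton_append]
          rw [if_neg (by omega : ¬ ((n : Nat) : Int) < r), List.append_assoc, ← hr]
          simp

-- ===== VERDICT (by name: the statement is the Claim_ definition above) =====
theorem objetivos_calculados_spec : Claim_equal_objetivos_calculados := by
  intro objetivo _ hpre
  obtain ⟨-, -, hp⟩ := hpre
  unfold Spec_objetivos_calculados objetivos_calculados objetivos_calculados_alt
  simp only []
  set d := PySem.Dict.ofList objetivo
  set c := d.getD "cantidad" 0 with hc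
  set p := d.getD "plazo" 0 with hpdef
  rcases lt_trichotomy p 0 with hneg | hzero | hpos
  · -- plazo < 0 : both sides are []
    have hr : PySem.Int.mod c p ≤ 0 := (PySem.Int.mod_neg_bounds c hneg).2
    rw [PySem.List.pyRange_one_eq_nil hr, bLoop]
    simp [Int.toNat_of_nonpos (le_of_lt hneg), dif_neg (by omega : ¬ (0:Int) < p)]
  · exact absurd hzero hp
  · -- plazo > 0
    have hcast : p = ((p.toNat : Nat) : Int) := by omega
    have hnpos : 0 < p.toNat := by omega
    rw [hcast, bLoop_eq p.toNat c [] hnpos, List.nil_append, List.reverse_reverse]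
    simp only [Int.toNat_natCast]
    have hr0 : 0 ≤ PySem.Int.mod c p := PySem.Int.mod_nonneg c hpos
    have hmcast : PySem.Int.mod c ((p.toNat : Nat) : Int)
        = (((PySem.Int.mod c p).toNat : Nat) : Int) := by rw [← hcast]; omega
    rw [hmcast, fill_loop _ p.toNat (PySem.Int.mod c p).toNat (by
      have := PySem.Int.mod_lt c hpos; omega)]
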